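-- pv_equiv track=rewrite | github.com/haneulkimhera/Programmers_algorithm | algorithm practice/hash/N개 중 K개를 고를 때 종류의 개수/choosing a tangerine.py | solution
-- ===== SOURCE A (Python) =====
-- import collections
--
-- def solution(k, tangerine):
--
--     answer = 0
--
--     # count = {}
--     # for tan in tangerine:
--     #     if tan in count:
--     #         count[tan] +=1
--     #     else:
--     #         count[tan] = 1
--
--     count = collections.Counter(tangerine)
--     count = sorted(count.values(), reverse=True)
--
--     picked = 0
--     answer = 0
--
--     for type_cnt in count:
--         picked += type_cnt
--         answer += 1
--
--         if picked >= k :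
--             return answer
--
--     return answer
-- ===== SOURCE B (Python) =====
-- import collections
--
-- def solution(k, tangerine):
--     # Counting buckets over the per-type counts (each count is between 1 and n),
--     # scanned from largest count down -- no comparison sort.
--     n = len(tangerine)
--     freq = [0] * (n + 1)
--     for c in collections.Counter(tangerine).values():
--         freq[c] += 1
--     picked = 0
--     answer = 0
--     for c in range(n, 0, -1):
--         for _ in range(freq[c]):
--             picked += c
--             answer += 1
--             if picked >= k:
--                 return answer
--     return answer
-- ===== Notes on version B (the rewrite author's own statement) =====
-- stated objective: alternative
-- what changed: Replaces sorted(count.values(), reverse=True) by a counting-bucket array indexed by per-type count (bounded by n) scanned from the largest count down, removing the comparison sort.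
import Mathlib
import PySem

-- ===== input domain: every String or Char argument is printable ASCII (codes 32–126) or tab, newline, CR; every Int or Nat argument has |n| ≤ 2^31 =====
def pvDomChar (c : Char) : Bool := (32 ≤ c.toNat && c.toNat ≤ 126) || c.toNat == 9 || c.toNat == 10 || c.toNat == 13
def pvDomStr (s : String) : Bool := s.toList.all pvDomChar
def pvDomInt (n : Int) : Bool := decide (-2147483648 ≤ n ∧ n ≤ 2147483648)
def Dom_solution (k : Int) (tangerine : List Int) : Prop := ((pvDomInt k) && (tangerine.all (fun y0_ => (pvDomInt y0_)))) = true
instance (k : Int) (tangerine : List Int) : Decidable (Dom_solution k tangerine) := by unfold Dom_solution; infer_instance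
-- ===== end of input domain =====

-- B replaces A's comparison sort of the per-type counts by counting buckets indexed by
-- count (bounded by n), scanned from largest to smallest: an alternative strategy (return value proved equal).


-- ===== PORT A =====
-- A's for-loop with early return: picked += c; answer += 1; if picked >= k: return answer
def solLoop (k : Int) : Int → Int → List Int → Int
  | _, answer, [] => answer
  | picked, answer, c :: rest =>
      if picked + c ≥ k then answer + 1 else solLoop k (picked + c) (answer + 1) rest

def solution (k : Int) (tangerine : List Int) : Int :=
  let count := PySem.Dict.counter tangerine
  let count' := PySem.List.sorted count.values (fun x => x) true
  solLoop k 0 0 count'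

-- ===== PORT B =====
-- inner 'for _ in range(freq[c])' loop; .inr = early return, .inl = state after the loop
def altInner (k c : Int) : Nat → Int → Int → (Int × Int) ⊕ Int
  | 0, picked, answer => .inl (picked, answer)
  | m + 1, picked, answer =>
      if picked + c ≥ k then .inr (answer + 1) else altInner k c m (picked + c) (answer + 1)

-- outer 'for c in range(n, 0, -1)' loop
def altOuter (k : Int) (freq : List Int) : List Int → Int → Int → Int
  | [], _, answer => answer
  | c :: rest, picked, answer =>
      match altInner k c (PySem.List.pyGetD freq c 0).toNat picked answer with
      | .inr ans => ans
      | .inl (p, a) => altOuter k freq rest p a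

def solution_alt (k : Int) (tangerine : List Int) : Int :=
  let n := tangerine.length
  let freq := (PySem.Dict.counter tangerine).values.foldl
      (fun f c => PySem.List.pySetD f c (PySem.List.pyGetD f c 0 + 1))
      (List.replicate (n + 1) (0 : Int))
  altOuter k freq (PySem.List.pyRange (n : Int) 0 (-1)) 0 0

-- ===== PRECONDITION & SPEC =====
def Spec_solution (k : Int) (tangerine : List Int) (out : Int) : Prop := out = solution_alt k tangerine
instance (k : Int) (tangerine : List Int) (out : Int) : Decidable (Spec_solution k tangerine out) := by unfold Spec_solution; infer_instance

-- ===== CLAIM (what is proved, stated in full; the proofs are below) =====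
def Claim_equal_solution : Prop := ∀ (k : Int) (tangerine : List Int), Dom_solution k tangerine → Spec_solution k tangerine (solution k tangerine)

-- ===== LEMMAS AND PROOFS =====

-- the inner loop is solLoop over a replicate block
lemma altInner_solLoop (k c : Int) (m : Nat) (picked answer : Int) (rest : List Int) :
    solLoop k picked answer (List.replicate m c ++ rest) =
      match altInner k c m picked answer with
      | .inr ans => ans
      | .inl (p, a) => solLoop k p a rest := by
  induction m generalizing picked answer with
  | zero => simp [altInner]
  | succ m ih =>
      simp only [List.replicate_succ, List.cons_append, solLoop, altInner]
      split_ifs with h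
      · rfl
      · exact ih _ _

-- the outer loop is solLoop over the flattened bucket list
lemma altOuter_solLoop (k : Int) (freq : List Int) (cs : List Int) (picked answer : Int) :
    altOuter k freq cs picked answer =
      solLoop k picked answer
        (cs.flatMap fun c => List.replicate (PySem.List.pyGetD freq c 0).toNat c) := by
  induction cs generalizing picked answer with
  | nil => rfl
  | cons c rest ih =>
      simp only [List.flatMap_cons, altOuter, altInner_solLoop]
      cases h : altInner k c (PySem.List.pyGetD freq c 0).toNat picked answer with
      | inl pa => cases pa; simp [ih]
      | inr ans => simp

-- frequency array built by the fold: freq[c] = count of c among vs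
lemma freq_fold_getD (vs : List Int) (f : List Int)
    (hv : ∀ v ∈ vs, 0 ≤ v ∧ v.toNat < f.length) (c : Int) (hc : 0 ≤ c) (hcl : c.toNat < f.length) :
    PySem.List.pyGetD
        (vs.foldl (fun f c => PySem.List.pySetD f c (PySem.List.pyGetD f c 0 + 1)) f) c 0
      = PySem.List.pyGetD f c 0 + vs.count c := by
  induction vs generalizing f with
  | nil => simp
  | cons v vs ih =>
      obtain ⟨hv0, hvl⟩ := hv v (by simp)
      have hset : PySem.List.pySetD f v (PySem.List.pyGetD f v 0 + 1)
          = f.set v.toNat (PySem.List.pyGetD f v 0 + 1) :=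
        PySem.List.pySetD_of_nonneg f _ hv0
      have hci : c < (f.length : Int) := by omega
      have hvi : v < (f.length : Int) := by omega
      rw [List.foldl_cons,
          ih _ (fun w hw => ⟨(hv w (by simp [hw])).1, by rw [hset, List.length_set]; exact (hv w (by simp [hw])).2⟩)
            (by rw [hset, List.length_set]; exact hcl)]
      rw [hset, PySem.List.pyGetD_eq_getElem _ _ hc (by rw [List.length_set]; exact_mod_cast hci),
          PySem.List.pyGetD_eq_getElem f _ hc hci, List.getElem_set,
          PySem.List.pyGetD_eq_getElem f _ hv0 hvi, List.count_cons]
      by_cases hvc : v = c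
      · subst hvc; simp; ring
      · have hne : v.toNat ≠ c.toNat := fun h => hvc (by omega)
        simp only [hne, beq_iff_eq, hvc, if_false]
        push_cast
        ring

-- sum of a point-mask over a nodup list
lemma sum_map_ite_nodup (cs : List Int) (hnd : cs.Nodup) (x : Int) (g : Int → Nat) :
    (cs.map (fun c => if x = c then g c else 0)).sum = if x ∈ cs then g x else 0 := by
  induction cs with
  | nil => simp
  | cons c cs ih =>
      simp only [List.nodup_cons] at hnd
      by_cases h : x = c
      · subst h
        simp [ih hnd.2, hnd.1]
      · simp [h, ih hnd.2]

-- the flattened bucket list is pairwise descending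
lemma flat_pairwise (cs : List Int) (g : Int → Nat) (h : cs.Pairwise (· > ·)) :
    (cs.flatMap fun c => List.replicate (g c) c).Pairwise (fun a b => b ≤ a) := by
  induction cs with
  | nil => simp
  | cons c rest ih =>
      simp only [List.pairwise_cons] at h
      simp only [List.flatMap_cons, List.pairwise_append]
      refine ⟨List.pairwise_replicate.2 (by simp), ih h.2, ?_⟩
      intro a ha b hb
      have ha' : a = c := List.eq_of_mem_replicate ha
      simp only [List.mem_flatMap] at hb
      obtain ⟨c', hc', hb'⟩ := hb
      have hb'' : b = c' := List.eq_of_mem_replicate hb'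
      subst ha'; subst hb''
      exact le_of_lt (h.1 _ hc')

-- every per-type count lies in [1, n]
lemma values_counter_bounds (t : List Int) :
    ∀ v ∈ (PySem.Dict.counter t).values, 1 ≤ v ∧ v ≤ (t.length : Int) := by
  intro v hv
  rw [PySem.Dict.values_eq_map_keys _ (PySem.Dict.nodup_keys_counter t) 0] at hv
  simp only [List.mem_map] at hv
  obtain ⟨x, hx, hvx⟩ := hv
  rw [PySem.Dict.keys_counter] at hx
  have hxmem : x ∈ t := (PySem.Set.mem_ofList _ _).1 hx
  rw [PySem.Dict.getD_counter] at hvx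
  subst hvx
  have h1 : 1 ≤ t.count x := List.count_pos_iff.2 hxmem
  have h2 : t.count x ≤ t.length := List.count_le_length
  exact ⟨by exact_mod_cast h1, by exact_mod_cast h2⟩

-- the flattened bucket list equals sorted(values, reverse=True)
lemma flat_eq_sorted (t : List Int) :
    ((PySem.List.pyRange (t.length : Int) 0 (-1)).flatMap
        fun c => List.replicate ((PySem.Dict.counter t).values.count c) c)
      = PySem.List.sorted (PySem.Dict.counter t).values (fun x => x) true := by
  set vals := (PySem.Dict.counter t).values with hvals
  have hbounds := values_counter_bounds t
  have hperm : ((PySem.List.pyRange (t.length : Int) 0 (-1)).flatMap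
      fun c => List.replicate (vals.count c) c).Perm vals := by
    rw [List.perm_iff_count]
    intro x
    rw [List.count_flatMap]
    have hrepl : ∀ c : Int, (List.count x ∘ fun c => List.replicate (vals.count c) c) c
        = if x = c then vals.count c else 0 := by
      intro c
      simp only [Function.comp_apply, List.count_replicate]
      by_cases hxc : x = c
      · simp [hxc]
      · simp [hxc, Ne.symm hxc]
    rw [show (List.count x ∘ fun c => List.replicate (vals.count c) c)
        = (fun c => if x = c then vals.count c else 0) from funext hrepl]
    rw [sum_map_ite_nodup _ (by
        rw [PySem.List.pyRange_neg_one_eq_reverse]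
        exact List.nodup_reverse.2 (PySem.List.nodup_pyRange_one _ _)) x (fun c => vals.count c)]
    split_ifs with hx
    · rfl
    · symm
      rw [List.count_eq_zero]
      intro hxv
      refine hx ?_
      rw [PySem.List.mem_pyRange_neg_one]
      have := hbounds x hxv
      omega
  have hpw : ((PySem.List.pyRange (t.length : Int) 0 (-1)).flatMap
      fun c => List.replicate (vals.count c) c).Pairwise (fun a b => b ≤ a) := by
    apply flat_pairwise
    rw [PySem.List.pyRange_neg_one_eq_reverse]
    exact (PySem.List.pairwise_lt_pyRange_one _ _).reverse
  have hsortpw : (PySem.List.sorted vals (fun x => x) true).Pairwise (fun a b => b ≤ a) :=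
    PySem.List.sorted_pairwise_rev vals (fun x => x)
  have hsortperm : (PySem.List.sorted vals (fun x => x) true).Perm vals :=
    PySem.List.sorted_perm vals (fun x => x) true
  exact (hperm.trans hsortperm.symm).eq_of_pairwise
    (by intro a b _ _ h1 h2; omega) hpw hsortpw

-- ===== VERDICT (by name: the statement is the Claim_ definition above) =====
theorem solution_spec : Claim_equal_solution := by
  intro k t _
  unfold Spec_solution solution solution_alt
  rw [altOuter_solLoop]
  set vals := (PySem.Dict.counter t).values with hvals
  set freq := vals.foldl (fun f c => PySem.List.pySetD f c (PySem.List.pyGetD f c 0 + 1))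
      (List.replicate (t.length + 1) (0 : Int)) with hfreqdef
  have hbounds := values_counter_bounds t
  have hfreq : ∀ c : Int, 0 ≤ c → c.toNat < t.length + 1 →
      PySem.List.pyGetD freq c 0 = (vals.count c : Int) := by
    intro c hc hcl
    rw [hfreqdef, freq_fold_getD vals _
        (fun v hv => ⟨by have := hbounds v hv; omega,
          by simp only [List.length_replicate]; have := hbounds v hv; omega⟩)
        c hc (by simpa using hcl)]
    rw [PySem.List.pyGetD_eq_getElem _ _ hc (by simp; omega)]
    simp
  have hflat : ((PySem.List.pyRange (t.length : Int) 0 (-1)).flatMap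
      fun c => List.replicate (PySem.List.pyGetD freq c 0).toNat c)
      = (PySem.List.pyRange (t.length : Int) 0 (-1)).flatMap
          fun c => List.replicate (vals.count c) c := by
    apply List.flatMap_congr
    intro c hc
    rw [PySem.List.mem_pyRange_neg_one] at hc
    rw [hfreq c (by omega) (by omega)]
    simp
  rw [hflat, flat_eq_sorted t]
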